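-- pv_equiv track=rewrite | github.com/mutator-tech-cto/scaffolders | init-empty-scala-project.py | camel_casify
-- ===== SOURCE A (Python) =====
-- def camel_casify(string):
-- 	result = ''
-- 	next_character_to_upper_case_flag = False
-- 	for i in range(0, len(string)):
-- 		if string[i] == '-':
-- 			next_character_to_upper_case_flag = True
-- 		else:
-- 			if next_character_to_upper_case_flag:
-- 				result += string[i].upper()
-- 				next_character_to_upper_case_flag = False
-- 			else:
-- 				result += string[i]
-- 	return result
-- ===== SOURCE B (Python) =====
-- def camel_casify(string):
-- 	parts = string.split('-')
-- 	return parts[0] + ''.join(p[:1].upper() + p[1:] for p in parts[1:])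
-- ===== Notes on version B (the rewrite author's own statement) =====
-- stated objective: idiomatic
-- what changed: Replaces the per-character boolean-flag state machine (with repeated string concatenation) by a split-on-hyphen-then-transform decomposition: keep the first token, uppercase the first character of each later token, join once.
import Mathlib
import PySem

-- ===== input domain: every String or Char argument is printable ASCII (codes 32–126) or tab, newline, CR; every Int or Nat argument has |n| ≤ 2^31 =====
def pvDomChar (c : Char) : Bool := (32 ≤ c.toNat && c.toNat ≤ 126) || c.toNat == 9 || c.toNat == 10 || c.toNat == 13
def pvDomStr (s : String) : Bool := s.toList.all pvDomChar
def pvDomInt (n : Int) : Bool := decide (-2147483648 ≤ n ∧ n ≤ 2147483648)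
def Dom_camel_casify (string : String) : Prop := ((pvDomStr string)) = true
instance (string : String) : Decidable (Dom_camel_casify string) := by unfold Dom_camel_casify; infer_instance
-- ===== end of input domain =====

-- B replaces A's per-character boolean-flag state machine with a split('-')-then-transform
-- decomposition (idiomatic; same return value on every input).

-- ===== PORT A =====
-- A: scan the characters left to right carrying (result, next_character_to_upper_case_flag).
def camel_casify (string : String) : String :=
  let st := string.toList.foldl
    (fun (st : List Char × Bool) ch =>
      if ch = '-' then (st.1, true)
      else if st.2 then (st.1 ++ [PySem.Chars.upperChar ch], false)
      else (st.1 ++ [ch], false))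
    ([], false)
  String.ofList st.1

-- ===== PORT B =====
-- B: parts = string.split('-'); parts[0] + ''.join(p[:1].upper() + p[1:] for p in parts[1:])
def camel_casify_alt (string : String) : String :=
  let parts := PySem.Chars.splitOn string.toList ['-']
  match parts with
  | [] => ""   -- unreachable: split never returns an empty list
  | h :: t =>
    String.ofList (h ++ PySem.Chars.join []
      (t.map fun p => PySem.Chars.upper (PySem.List.slice p none (some 1)) ++
                      PySem.List.slice p (some 1) none))

-- ===== PRECONDITION & SPEC =====
def Spec_camel_casify (string : String) (out : String) : Prop := out = camel_casify_alt string
instance (string : String) (out : String) : Decidable (Spec_camel_casify string out) := by unfold Spec_camel_casify; infer_instance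

-- ===== CLAIM (what is proved, stated in full; the proofs are below) =====
def Claim_equal_camel_casify : Prop := ∀ (string : String), Dom_camel_casify string → Spec_camel_casify string (camel_casify string)

-- ===== LEMMAS AND PROOFS =====

-- simple recursive characterisation of split on the single-char separator '-'
def pvSp : List Char → List (List Char)
  | [] => [[]]
  | c :: cs => if c = '-' then [] :: pvSp cs
               else match pvSp cs with
                    | [] => [[c]]
                    | h :: t => (c :: h) :: t

lemma pvSp_ne_nil (cs : List Char) : pvSp cs ≠ [] := by
  cases cs with
  | nil => simp [pvSp]
  | cons c cs =>
    simp only [pvSp]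
    split
    · simp
    · split <;> simp

-- prepend a prefix onto the first piece
def pvConsHead (p : List Char) : List (List Char) → List (List Char)
  | [] => [p]
  | h :: t => (p ++ h) :: t

lemma splitOn_go_eq (fuel : Nat) : ∀ (l cur : List Char) (acc : List (List Char)),
    l.length ≤ fuel →
    PySem.Chars.splitOn.go ['-'] fuel l cur acc = acc.reverse ++ pvConsHead cur.reverse (pvSp l) := by
  induction fuel with
  | zero =>
    intro l cur acc h
    have : l = [] := by cases l <;> simp_all
    subst this
    simp [PySem.Chars.splitOn.go, pvSp, pvConsHead]
  | succ f ih =>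
    intro l cur acc h
    cases l with
    | nil => simp [PySem.Chars.splitOn.go, pvSp, pvConsHead]
    | cons c rest =>
      simp only [PySem.Chars.splitOn.go]
      by_cases hc : c = '-'
      · subst hc
        simp only [List.isPrefixOf, Bool.and_true, beq_self_eq_true,
          if_pos, List.length_singleton, List.drop_one, List.tail_cons]
        rw [ih rest [] ((cur.reverse) :: acc) (by simpa using Nat.le_of_succ_le_succ h)]
        simp only [pvSp, pvConsHead, List.reverse_cons, List.append_assoc,
          List.reverse_nil, List.nil_append]
        cases hh : pvSp rest with
        | nil => exact absurd hh (pvSp_ne_nil rest)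
        | cons a b => simp
      · have hpre : (['-'].isPrefixOf (c :: rest)) = false := by
          simp [List.isPrefixOf]
          exact fun hcontra => (hc hcontra.symm).elim
        rw [hpre]
        simp only [Bool.false_eq_true, if_false]
        rw [ih rest (c :: cur) acc (by simpa using Nat.le_of_succ_le_succ h)]
        have hsp := pvSp_ne_nil rest
        cases hh : pvSp rest with
        | nil => exact absurd hh hsp
        | cons h0 t0 =>
          simp [pvSp, hc, hh, pvConsHead]

lemma splitOn_eq_pvSp (cs : List Char) : PySem.Chars.splitOn cs ['-'] = pvSp cs := by
  unfold PySem.Chars.splitOn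
  rw [splitOn_go_eq (cs.length + 1) cs [] [] (by omega)]
  simp [pvConsHead]
  cases hh : pvSp cs with
  | nil => exact absurd hh (pvSp_ne_nil cs)
  | cons h t => simp

-- B's per-token transform, on lists
def pvCap (p : List Char) : List Char := PySem.Chars.upper (p.take 1) ++ p.drop 1

lemma pvCap_nil : pvCap [] = [] := by simp [pvCap, PySem.Chars.upper]

lemma pvCap_cons (c : Char) (p : List Char) :
    pvCap (c :: p) = PySem.Chars.upperChar c :: p := by
  simp [pvCap, PySem.Chars.upper]

lemma join_nil_eq_flatten (parts : List (List Char)) :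
    PySem.Chars.join [] parts = parts.flatten := by
  induction parts with
  | nil => simp [PySem.Chars.join, List.intercalate]
  | cons h t ih =>
    cases t with
    | nil => simp [PySem.Chars.join, List.intercalate]
    | cons h2 t2 =>
      simp only [PySem.Chars.join, List.intercalate] at *
      simp [List.intersperse] at *
      simpa using ih

-- A's fold step
def pvStep (st : List Char × Bool) (ch : Char) : List Char × Bool :=
  if ch = '-' then (st.1, true)
  else if st.2 then (st.1 ++ [PySem.Chars.upperChar ch], false)
  else (st.1 ++ [ch], false)

lemma pvStep_dash (r : List Char) (fl : Bool) : pvStep (r, fl) '-' = (r, true) := by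
  simp [pvStep]

lemma pvStep_false {c : Char} (hc : c ≠ '-') (r : List Char) :
    pvStep (r, false) c = (r ++ [c], false) := by simp [pvStep, hc]

lemma pvStep_true {c : Char} (hc : c ≠ '-') (r : List Char) :
    pvStep (r, true) c = (r ++ [PySem.Chars.upperChar c], false) := by simp [pvStep, hc]

lemma foldl_pvStep_shift (cs : List Char) : ∀ (acc : List Char) (flag : Bool),
    (cs.foldl pvStep (acc, flag)).1 = acc ++ (cs.foldl pvStep ([], flag)).1 := by
  induction cs with
  | nil => intro acc flag; simp
  | cons c cs ih =>
    intro acc flag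
    rw [List.foldl_cons, List.foldl_cons]
    by_cases hc : c = '-'
    · subst hc
      rw [pvStep_dash, pvStep_dash]
      exact ih acc true
    · cases flag
      · rw [pvStep_false hc, pvStep_false hc]
        rw [ih (acc ++ [c]) false, ih ([] ++ [c]) false]
        simp
      · rw [pvStep_true hc, pvStep_true hc]
        rw [ih (acc ++ [PySem.Chars.upperChar c]) false, ih ([] ++ [PySem.Chars.upperChar c]) false]
        simp

def pvA0 (cs : List Char) : List Char := (cs.foldl pvStep ([], false)).1
def pvA1 (cs : List Char) : List Char := (cs.foldl pvStep ([], true)).1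

def pvB0 (cs : List Char) : List Char :=
  match pvSp cs with
  | [] => []
  | h :: t => h ++ (t.map pvCap).flatten

def pvB1 (cs : List Char) : List Char := ((pvSp cs).map pvCap).flatten

lemma pvA_eq_pvB (cs : List Char) : pvA0 cs = pvB0 cs ∧ pvA1 cs = pvB1 cs := by
  induction cs with
  | nil => constructor <;> simp [pvA0, pvA1, pvB0, pvB1, pvSp, pvCap_nil]
  | cons c cs ih =>
    obtain ⟨ih0, ih1⟩ := ih
    by_cases hc : c = '-'
    · subst hc
      constructor
      · show (List.foldl pvStep (pvStep ([], false) '-') cs).1 = _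
        simp only [pvStep]
        show pvA1 cs = pvB0 ('-' :: cs)
        rw [ih1]
        simp [pvB0, pvB1, pvSp]
      · show (List.foldl pvStep (pvStep ([], true) '-') cs).1 = _
        simp only [pvStep]
        show pvA1 cs = pvB1 ('-' :: cs)
        rw [ih1]
        simp [pvB1, pvSp, pvCap_nil]
    · obtain ⟨h0, t0, hh⟩ : ∃ h0 t0, pvSp cs = h0 :: t0 := by
        cases hsp : pvSp cs with
        | nil => exact absurd hsp (pvSp_ne_nil cs)
        | cons a b => exact ⟨a, b, rfl⟩
      constructor
      · show (List.foldl pvStep (pvStep ([], false) c) cs).1 = _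
        simp only [pvStep, if_neg hc, Bool.false_eq_true, if_false]
        rw [foldl_pvStep_shift]
        show [c] ++ pvA0 cs = pvB0 (c :: cs)
        rw [ih0]
        simp [pvB0, pvSp, hc, hh]
      · show (List.foldl pvStep (pvStep ([], true) c) cs).1 = _
        simp only [pvStep, if_neg hc]
        rw [foldl_pvStep_shift]
        show [PySem.Chars.upperChar c] ++ pvA0 cs = pvB1 (c :: cs)
        rw [ih0]
        simp [pvB1, pvB0, pvSp, hc, hh, pvCap_cons]

-- ===== VERDICT (by name: the statement is the Claim_ definition above) =====
theorem camel_casify_spec : Claim_equal_camel_casify := by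
  intro s _
  show camel_casify s = camel_casify_alt s
  unfold camel_casify camel_casify_alt
  rw [splitOn_eq_pvSp]
  obtain ⟨h0, t0, hh⟩ : ∃ h0 t0, pvSp s.toList = h0 :: t0 := by
    cases hsp : pvSp s.toList with
    | nil => exact absurd hsp (pvSp_ne_nil s.toList)
    | cons a b => exact ⟨a, b, rfl⟩
  have hA : (s.toList.foldl pvStep ([], false)).1 = pvB0 s.toList := (pvA_eq_pvB s.toList).1
  simp only [hh]
  have hstep : (fun (st : List Char × Bool) ch =>
      if ch = '-' then (st.1, true)
      else if st.2 then (st.1 ++ [PySem.Chars.upperChar ch], false)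
      else (st.1 ++ [ch], false)) = pvStep := by
    funext st ch; simp [pvStep]
  rw [hstep, hA]
  simp only [pvB0, hh]
  congr 1
  have hcap : pvCap = fun p : List Char => PySem.Chars.upper (p.take 1) ++ p.tail := by
    funext p; simp [pvCap, List.drop_one]
  simp [join_nil_eq_flatten, hcap,
        PySem.List.slice_to _ (by norm_num : (0:Int) ≤ 1),
        PySem.List.slice_from _ (by norm_num : (0:Int) ≤ 1)]
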